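-- pv_equiv track=rewrite | github.com/lilyhuong/TD2-S1-L1-Info-MIASHS | EX6.2.TD2. Nguyen Thi Huong.py | Huong
-- ===== SOURCE A (Python) =====
-- def Huong(array):
--     output = []
--     temp = 0
--     for i in range(0, len(array)) :
--         if i % 2 == 0:
--             temp = array[i]
--         else:
--             temp = temp + array[i]
--             output.append(temp)
--     return output
-- ===== SOURCE B (Python) =====
-- def Huong(array):
--     it = iter(array)
--     return [a + b for a, b in zip(it, it)]
-- ===== Notes on version B (the rewrite author's own statement) =====
-- stated objective: idiomatic
-- what changed: B pairs consecutive elements directly (zip of one iterator with itself) and sums each pair, removing A's index loop, parity test and temp carry variable; the per-element indexing and modulo work moves into C-level zip/iteration.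
import Mathlib
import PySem

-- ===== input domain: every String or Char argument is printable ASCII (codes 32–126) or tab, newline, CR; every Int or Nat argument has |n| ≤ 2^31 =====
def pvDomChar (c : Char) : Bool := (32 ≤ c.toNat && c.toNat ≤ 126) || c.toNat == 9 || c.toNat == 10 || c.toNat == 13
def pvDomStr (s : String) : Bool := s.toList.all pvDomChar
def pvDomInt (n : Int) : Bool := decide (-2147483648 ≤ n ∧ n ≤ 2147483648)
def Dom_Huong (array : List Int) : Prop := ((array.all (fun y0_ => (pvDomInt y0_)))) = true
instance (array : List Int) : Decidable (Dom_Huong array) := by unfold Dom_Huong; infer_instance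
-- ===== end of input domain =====

-- B sums consecutive pairs by direct two-at-a-time pairing (zip of an iterator with
-- itself in Python), removing A's index loop, parity test and temp carry (objective: idiomatic).

-- ===== PORT A =====
-- literal port: loop over range(0, len(array)) with state (output, temp);
-- the loop index i is always ≥ 0, so Lean's `i % 2` agrees with Python's `i % 2` here.
def Huong (array : List Int) : List Int :=
  ((PySem.List.pyRange 0 (PySem.List.len array) 1).foldl
    (fun (st : List Int × Int) (i : Int) =>
      if i % 2 == 0 then
        (st.1, PySem.List.pyGetD array i 0)
      else
        (st.1 ++ [st.2 + PySem.List.pyGetD array i 0], st.2 + PySem.List.pyGetD array i 0))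
    ([], 0)).1

-- ===== PORT B =====
-- port of Source B's zip(it, it) pairing: consume two elements at a time, sum each pair.
def Huong_alt : List Int → List Int
  | a :: b :: rest => (a + b) :: Huong_alt rest
  | _ => []

-- ===== PRECONDITION & SPEC =====
def Spec_Huong (array : List Int) (out : List Int) : Prop := out = Huong_alt array
instance (array : List Int) (out : List Int) : Decidable (Spec_Huong array out) := by unfold Spec_Huong; infer_instance

-- ===== CLAIM (what is proved, stated in full; the proofs are below) =====
def Claim_equal_Huong : Prop := ∀ (array : List Int), Dom_Huong array → Spec_Huong array (Huong array)

-- ===== LEMMAS AND PROOFS =====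

-- A's loop, re-expressed as a fold over enumerate, appends exactly the pair sums of the
-- remaining elements whenever the next index is even.
theorem Huong_loop_pairs (xs : List Int) :
    ∀ (s : Int) (out : List Int) (t : Int), 0 ≤ s → s % 2 = 0 →
    ((PySem.List.enumerate xs s).foldl
      (fun (st : List Int × Int) (p : Int × Int) =>
        if p.1 % 2 == 0 then (st.1, p.2) else (st.1 ++ [st.2 + p.2], st.2 + p.2))
      (out, t)).1 = out ++ Huong_alt xs := by
  induction xs using Huong_alt.induct with
  | case1 a b rest ih =>
    intro s out t hs he
    have h1 : (s % 2 == 0) = true := by simpa using he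
    have h2 : ((s + 1) % 2 == 0) = false := by
      simp only [beq_eq_false_iff_ne, ne_eq]
      omega
    rw [PySem.List.enumerate_cons, PySem.List.enumerate_cons, List.foldl_cons,
      List.foldl_cons, if_pos h1, if_neg (by simp [h2])]
    rw [ih (s + 1 + 1) (out ++ [a + b]) (a + b) (by omega) (by omega)]
    simp [Huong_alt]
  | case2 x hx =>
    intro s out t hs he
    match x, hx with
    | [], _ =>
      simp [PySem.List.enumerate_nil, Huong_alt]
    | [a], _ =>
      have h1 : (s % 2 == 0) = true := by simpa using he
      rw [PySem.List.enumerate_cons, PySem.List.enumerate_nil, List.foldl_cons,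
        if_pos h1, List.foldl_nil]
      simp [Huong_alt]
    | a :: b :: rest, hx =>
      exact (hx a b rest rfl).elim

-- ===== VERDICT (by name: the statement is the Claim_ definition above) =====
theorem Huong_spec : Claim_equal_Huong := by
  intro array _
  show Huong array = Huong_alt array
  have h := Huong_loop_pairs array 0 [] 0 (le_refl 0) rfl
  rw [PySem.List.enumerate_eq_map_pyRange (d := 0), List.foldl_map] at h
  simpa [Huong] using h
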